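-- pv_equiv track=rewrite | github.com/alecmori/project_euler_answers | answers/problem_29/run_problem.py | generate_perfect_powers
-- ===== SOURCE A (Python) =====
-- import math
--
-- def generate_perfect_powers(upper_bound=0):
--     d = {}
--     i = 2
--     while i <= int(math.sqrt(upper_bound)):
--         power = 2
--         curr_power = i ** power
--         while curr_power <= upper_bound:
--             d[curr_power] = max(power, d.get(curr_power, -1))
--             power += 1
--             curr_power = i ** power
--         i += 1
--     return d
-- ===== SOURCE B (Python) =====
-- def generate_perfect_powers(upper_bound=0):
--     # Sieve over primitive bases only: a base that already appeared as a power
--     # is skipped (its powers were recorded, with larger exponents, by its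
--     # primitive root), so every key is written exactly once.
--     d = {}
--     skip = set()
--     base = 2
--     while base * base <= upper_bound:
--         if base not in skip:
--             exp = 2
--             pw = base * base
--             while pw <= upper_bound:
--                 d[pw] = exp
--                 skip.add(pw)
--                 exp += 1
--                 pw *= base
--         base += 1
--     return d
-- ===== Notes on version B (the rewrite author's own statement) =====
-- stated objective: alternative
-- what changed: Instead of iterating every base and deduplicating repeated perfect powers with d.get/max, B sieves: it keeps a skip set of values already produced as powers, processes only primitive bases (those not in the set), builds powers by repeated multiplication instead of i**power, and writes each dict key exactly once.
import Mathlib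
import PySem

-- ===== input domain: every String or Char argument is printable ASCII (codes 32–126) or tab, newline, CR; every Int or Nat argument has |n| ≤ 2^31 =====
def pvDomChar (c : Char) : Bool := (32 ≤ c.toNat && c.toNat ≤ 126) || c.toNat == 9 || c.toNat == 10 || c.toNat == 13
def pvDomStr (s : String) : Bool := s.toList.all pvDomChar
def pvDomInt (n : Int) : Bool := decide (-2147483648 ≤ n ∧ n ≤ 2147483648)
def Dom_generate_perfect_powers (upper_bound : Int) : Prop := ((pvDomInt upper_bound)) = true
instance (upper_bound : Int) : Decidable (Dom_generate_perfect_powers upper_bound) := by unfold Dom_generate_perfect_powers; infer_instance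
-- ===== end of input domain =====

-- B replaces A's all-bases loop with a sieve over primitive bases (a skip set of values
-- already produced as powers), writing each dict key exactly once; alternative algorithm,
-- not measured faster. A raises ValueError for negative upper_bound (excluded by Pre_);
-- B's own loop simply returns {} there.


-- ===== PORT A =====
-- inner 'while curr_power <= upper_bound' loop; fuel only makes the recursion total
-- (the loop runs at most log2(ub) times, far below the fuel supplied)
def gppLoopA (ub i : Int) : Nat → Int → PySem.Dict Int Int → PySem.Dict Int Int
  | 0, _, d => d
  | fuel+1, power, d =>
    let curr_power := i ^ power.toNat
    if curr_power ≤ ub then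
      gppLoopA ub i fuel (power + 1) (d.insert curr_power (max power (d.getD curr_power (-1))))
    else d

-- 'while i <= int(math.sqrt(upper_bound))' as a counting loop; int(math.sqrt(ub)) is
-- exactly Nat.sqrt for 0 ≤ ub ≤ 2^31 (double sqrt is correctly rounded there);
-- for ub < 0 Python raises ValueError — excluded by Pre_.
def generate_perfect_powers (upper_bound : Int) : List (Int × Int) :=
  ((PySem.List.pyRange 2 ((Nat.sqrt upper_bound.toNat : Int) + 1) 1).foldl
    (fun d i => gppLoopA upper_bound i (upper_bound.toNat + 1) 2 d)
    PySem.Dict.empty).items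

-- ===== PORT B =====
-- inner 'while pw <= upper_bound' loop of Source B (fuel for totality only)
def gppLoopB (ub base : Int) : Nat → Int → Int → PySem.Dict Int Int → PySem.Set Int →
    PySem.Dict Int Int × PySem.Set Int
  | 0, _, _, d, skip => (d, skip)
  | fuel+1, exp, pw, d, skip =>
    if pw ≤ ub then
      gppLoopB ub base fuel (exp + 1) (pw * base) (d.insert pw exp) (PySem.Set.add skip pw)
    else (d, skip)

-- outer 'while base * base <= upper_bound' loop of Source B
def gppOuterB (ub : Int) : Nat → Int → PySem.Dict Int Int → PySem.Set Int → PySem.Dict Int Int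
  | 0, _, d, _ => d
  | fuel+1, base, d, skip =>
    if base * base ≤ ub then
      if PySem.Set.contains skip base then
        gppOuterB ub fuel (base + 1) d skip
      else
        let st := gppLoopB ub base (ub.toNat + 1) 2 (base * base) d skip
        gppOuterB ub fuel (base + 1) st.1 st.2
    else d

def generate_perfect_powers_alt (upper_bound : Int) : List (Int × Int) :=
  (gppOuterB upper_bound (upper_bound.toNat + 2) 2 PySem.Dict.empty PySem.Set.empty).items

-- ===== PRECONDITION & SPEC =====
-- A raises ValueError (math.sqrt of a negative number) for upper_bound < 0.
def Pre_generate_perfect_powers (upper_bound : Int) : Prop := 0 ≤ upper_bound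
instance (upper_bound : Int) : Decidable (Pre_generate_perfect_powers upper_bound) := by
  unfold Pre_generate_perfect_powers; infer_instance

def pvWitness_generate_perfect_powers : Int := 100

def Spec_generate_perfect_powers (upper_bound : Int) (out : List (Int × Int)) : Prop :=
  out = generate_perfect_powers_alt upper_bound
instance (upper_bound : Int) (out : List (Int × Int)) : Decidable (Spec_generate_perfect_powers upper_bound out) := by
  unfold Spec_generate_perfect_powers; infer_instance

-- ===== CLAIM (what is proved, stated in full; the proofs are below) =====
def Claim_equal_generate_perfect_powers : Prop := ∀ (upper_bound : Int), Dom_generate_perfect_powers upper_bound → Pre_generate_perfect_powers upper_bound → Spec_generate_perfect_powers upper_bound (generate_perfect_powers upper_bound)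

-- ===== LEMMAS AND PROOFS =====

-- a natural number ≥ 2 that is not a perfect power
def pvPrim (n : ℕ) : Bool :=
  2 ≤ n && !((List.range n).any fun a => 2 ≤ a && ((List.range (n+1)).any fun k => 2 ≤ k && a ^ k == n))

-- the block of pairs (q^e, e) produced for one base q, exponents from p while q^e ≤ ub
def pvBlk (ub q : Int) : Nat → Nat → List (Int × Int)
  | 0, _ => []
  | f+1, p => if q ^ p ≤ ub then (q ^ p, (p : Int)) :: pvBlk ub q f (p + 1) else []

-- the dict contents after both programs have processed bases 2,…,b-1
def pvCanon (ub : Int) (b : ℕ) : List (Int × Int) :=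
  (List.range' 2 (b - 2)).flatMap fun q =>
    if pvPrim q then pvBlk ub (q : Int) (ub.toNat + 1) 2 else []

theorem pvPow_bounds {a k n : ℕ} (ha : 2 ≤ a) (hk : 2 ≤ k) (hak : a ^ k = n) :
    a < n ∧ k < n + 1 := by
  have h1 : a < a ^ k := by
    calc a = a ^ 1 := (pow_one a).symm
      _ < a ^ k := Nat.pow_lt_pow_right (by omega) (by omega)
  have h2 : k < 2 ^ k := Nat.lt_two_pow_self
  have h3 : 2 ^ k ≤ a ^ k := Nat.pow_le_pow_left ha k
  omega

theorem pvPrim_iff (n : ℕ) :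
    pvPrim n = true ↔ 2 ≤ n ∧ ¬∃ a k : ℕ, 2 ≤ a ∧ 2 ≤ k ∧ a ^ k = n := by
  unfold pvPrim
  rw [Bool.and_eq_true, decide_eq_true_iff, Bool.not_eq_true', List.any_eq_false]
  constructor
  · rintro ⟨h2, hno⟩
    refine ⟨h2, ?_⟩
    rintro ⟨a, k, ha, hk, hak⟩
    have hb := pvPow_bounds ha hk hak
    refine hno a (List.mem_range.mpr hb.1) ?_
    simp only [Bool.and_eq_true, decide_eq_true_iff, List.any_eq_true, List.mem_range, beq_iff_eq]
    exact ⟨ha, k, hb.2, hk, hak⟩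
  · rintro ⟨h2, hno⟩
    refine ⟨h2, ?_⟩
    intro a _ hx
    simp only [Bool.and_eq_true, decide_eq_true_iff, List.any_eq_true, List.mem_range, beq_iff_eq] at hx
    obtain ⟨h2a, k, _, h2k, hak⟩ := hx
    exact hno ⟨a, k, h2a, h2k, hak⟩

theorem pvPrim_two_le {n : ℕ} (h : pvPrim n = true) : 2 ≤ n := ((pvPrim_iff n).mp h).1

theorem pvExists_prim_root : ∀ b : ℕ, 2 ≤ b → ∃ s m : ℕ, pvPrim s = true ∧ 1 ≤ m ∧ s ^ m = b := by
  intro b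
  induction b using Nat.strong_induction_on with
  | _ b ih =>
    intro hb
    by_cases hp : pvPrim b = true
    · exact ⟨b, 1, hp, le_refl 1, pow_one b⟩
    · have hex : ∃ a k : ℕ, 2 ≤ a ∧ 2 ≤ k ∧ a ^ k = b := by
        by_contra hc
        exact hp ((pvPrim_iff b).mpr ⟨hb, hc⟩)
      obtain ⟨a, k, ha, hk, hak⟩ := hex
      obtain ⟨s, m, hs, hm, hsm⟩ := ih a (pvPow_bounds ha hk hak).1 ha
      exact ⟨s, m * k, hs, by
        have : 1 ≤ m * k := Nat.mul_pos (by omega) (by omega)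
        omega, by rw [pow_mul, hsm, hak]⟩

theorem pvPrim_pow_inj {s t e f : ℕ} (hs : pvPrim s = true) (ht : pvPrim t = true)
    (he : 1 ≤ e) (hf : 1 ≤ f) (h : s ^ e = t ^ f) : s = t ∧ e = f := by
  obtain ⟨hs2, hsnp⟩ := (pvPrim_iff s).mp hs
  obtain ⟨ht2, htnp⟩ := (pvPrim_iff t).mp ht
  obtain ⟨c, hc1, hc2⟩ := Nat.exists_eq_pow_of_pow_eq_pow (Or.inl (by omega)) h
  set g := Nat.gcd e f with hg
  have hge : g ∣ e := Nat.gcd_dvd_left e f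
  have hgf : g ∣ f := Nat.gcd_dvd_right e f
  have hg0 : 0 < g := Nat.gcd_pos_of_pos_left f (by omega)
  have hfg1 : 1 ≤ f / g := (Nat.one_le_div_iff hg0).mpr (Nat.le_of_dvd (by omega) hgf)
  have heg1 : 1 ≤ e / g := (Nat.one_le_div_iff hg0).mpr (Nat.le_of_dvd (by omega) hge)
  have hc : 2 ≤ c := by
    rcases Nat.lt_or_ge c 2 with h2 | h2
    · interval_cases c
      · have : s = 0 := by rw [hc1]; exact Nat.zero_pow (by omega)
        omega
      · have : s = 1 := by rw [hc1, one_pow]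
        omega
    · exact h2
  have hfg : f / g = 1 := by
    by_contra hne
    exact hsnp ⟨c, f / g, hc, by omega, hc1.symm⟩
  have heg : e / g = 1 := by
    by_contra hne
    exact htnp ⟨c, e / g, hc, by omega, hc2.symm⟩
  have hef : e = g := by
    have h' := Nat.div_mul_cancel hge
    rw [heg, one_mul] at h'
    omega
  have hff : f = g := by
    have h' := Nat.div_mul_cancel hgf
    rw [hfg, one_mul] at h'
    omega
  have h1 : s = c := by rw [hc1, hfg, pow_one]
  have h2 : t = c := by rw [hc2, heg, pow_one]
  constructor <;> omega

-- cast bookkeeping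
theorem pvCastPow (q p : ℕ) : ((q : Int)) ^ p = ((q ^ p : ℕ) : Int) := by push_cast; ring

theorem pvMkItems (d : PySem.Dict Int Int) : PySem.Dict.mk d.items = d := by cases d; rfl

theorem pvBlk_mem_fwd {ub : Int} {q : ℕ} :
    ∀ {f p : ℕ} {x v : Int}, (x, v) ∈ pvBlk ub (q : Int) f p →
      ∃ e : ℕ, p ≤ e ∧ ((q ^ e : ℕ) : Int) ≤ ub ∧ x = ((q ^ e : ℕ) : Int) ∧ v = (e : Int) := by
  intro f
  induction f with
  | zero => intro p x v h; simp [pvBlk] at h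
  | succ f ih =>
    intro p x v h
    rw [pvBlk] at h
    by_cases hle : (q : Int) ^ p ≤ ub
    · rw [if_pos hle, List.mem_cons] at h
      rcases h with h | h
      · refine ⟨p, le_refl p, ?_, ?_, ?_⟩
        · rw [← pvCastPow]; exact hle
        · rw [← pvCastPow]; exact congrArg Prod.fst h
        · exact congrArg Prod.snd h
      · obtain ⟨e, he, h1, h2, h3⟩ := ih h
        exact ⟨e, by omega, h1, h2, h3⟩
    · rw [if_neg hle] at h; simp at h

theorem pvBlk_mem {ub : Int} {q : ℕ} (hq : 2 ≤ q) :
    ∀ (f p : ℕ) (x v : Int), ub < ((q ^ (p + f) : ℕ) : Int) →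
      ((x, v) ∈ pvBlk ub (q : Int) f p ↔
        ∃ e : ℕ, p ≤ e ∧ ((q ^ e : ℕ) : Int) ≤ ub ∧ x = ((q ^ e : ℕ) : Int) ∧ v = (e : Int)) := by
  intro f
  induction f with
  | zero =>
    intro p x v hbound
    simp only [pvBlk, List.not_mem_nil, false_iff]
    rintro ⟨e, he, hle, _, _⟩
    have : q ^ (p + 0) ≤ q ^ e := Nat.pow_le_pow_right (by omega) (by omega)
    have : ((q ^ (p + 0) : ℕ) : Int) ≤ ((q ^ e : ℕ) : Int) := by exact_mod_cast this
    omega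
  | succ f ih =>
    intro p x v hbound
    constructor
    · exact pvBlk_mem_fwd
    · rintro ⟨e, he, hle, hx, hv⟩
      rw [pvBlk]
      by_cases hep : e = p
      · rw [if_pos (by rw [pvCastPow, ← hep]; exact hle)]
        have hxy : (x, v) = ((q : Int) ^ p, (p : Int)) := by
          rw [pvCastPow, hx, hv, hep]
        rw [hxy]
        exact List.mem_cons_self ..
      · have hle' : (q : Int) ^ p ≤ ub := by
          rw [pvCastPow]
          have : q ^ p ≤ q ^ e := Nat.pow_le_pow_right (by omega) (by omega)
          have : ((q ^ p : ℕ) : Int) ≤ ((q ^ e : ℕ) : Int) := by exact_mod_cast this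
          omega
        rw [if_pos hle']
        refine List.mem_cons_of_mem _ ?_
        rw [ih (p + 1) x v (by rw [show p + 1 + f = p + (f + 1) by omega]; exact hbound)]
        exact ⟨e, by omega, hle, hx, hv⟩

-- inserting a key already present with its own value is a no-op
theorem pvInsert_self {d : PySem.Dict Int Int} {k v : Int} (hnd : d.keys.Nodup)
    (h : d.get? k = some v) : d.insert k v = d := by
  apply PySem.Dict.ext
  have hc : d.contains k = true := by
    rw [PySem.Dict.contains_eq_isSome_get?, h]; rfl
  rw [PySem.Dict.items_insert_of_contains _ _ hc]
  have hid : ∀ p ∈ d.items, (if p.1 == k then (k, v) else p) = p := by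
    rintro ⟨k1, v1⟩ hp
    by_cases hpk : k1 = k
    · subst hpk
      have hg : d.get? k1 = some v1 := PySem.Dict.get?_of_mem_items _ hp hnd
      rw [h] at hg
      have hv : v1 = v := by injection hg with hh; exact hh.symm
      simp [hv]
    · simp [hpk]
  rw [List.map_congr_left hid]
  simp

-- fuel is always sufficient: q^(p + (ub.toNat+1)) exceeds ub
theorem pvFuel_ok {ub : Int} (hub : 0 ≤ ub) {q : ℕ} (hq : 2 ≤ q) (p : ℕ) :
    ub < ((q ^ (p + (ub.toNat + 1)) : ℕ) : Int) := by
  have h1 : ub.toNat < 2 ^ (ub.toNat + 1) := by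
    have := Nat.lt_two_pow_self (n := ub.toNat)
    have h2 : (2:ℕ) ^ ub.toNat < 2 ^ (ub.toNat + 1) := Nat.pow_lt_pow_right (by omega) (by omega)
    omega
  have h2 : (2:ℕ) ^ (ub.toNat + 1) ≤ 2 ^ (p + (ub.toNat + 1)) := Nat.pow_le_pow_right (by omega) (by omega)
  have h3 : (2:ℕ) ^ (p + (ub.toNat + 1)) ≤ q ^ (p + (ub.toNat + 1)) := Nat.pow_le_pow_left hq _
  have h4 : ub.toNat < q ^ (p + (ub.toNat + 1)) := by omega
  have h5 : (ub.toNat : Int) = ub := Int.toNat_of_nonneg hub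
  have h6 : ((ub.toNat : ℕ) : Int) < ((q ^ (p + (ub.toNat + 1)) : ℕ) : Int) := by exact_mod_cast h4
  omega

-- A's inner loop over fresh keys appends the block
theorem pvLoopA_fresh {ub : Int} {q : ℕ} (hq : 2 ≤ q) :
    ∀ (f p : ℕ) (d : PySem.Dict Int Int), 1 ≤ p → ub < ((q ^ (p + f) : ℕ) : Int) →
    (∀ e : ℕ, p ≤ e → ((q ^ e : ℕ) : Int) ≤ ub → d.contains ((q ^ e : ℕ) : Int) = false) →
    gppLoopA ub (q : Int) f (p : Int) d = PySem.Dict.mk (d.items ++ pvBlk ub (q : Int) f p) := by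
  intro f
  induction f with
  | zero => intro p d _ _ _; rw [gppLoopA, pvBlk, List.append_nil, pvMkItems]
  | succ f ih =>
    intro p d hp hbound hfresh
    rw [gppLoopA, pvBlk]
    simp only [Int.toNat_natCast]
    by_cases hle : (q : Int) ^ p ≤ ub
    · rw [if_pos hle, if_pos hle]
      have hle' : ((q ^ p : ℕ) : Int) ≤ ub := by rw [← pvCastPow]; exact hle
      have hcontains : d.contains ((q : Int) ^ p) = false := by
        rw [pvCastPow]; exact hfresh p (le_refl p) hle'
      have hgetD : d.getD ((q : Int) ^ p) (-1) = -1 := PySem.Dict.getD_of_not_contains _ _ hcontains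
      rw [hgetD]
      have hmax : max (p : Int) (-1) = (p : Int) := by omega
      rw [hmax]
      have hstep : (p : Int) + 1 = ((p + 1 : ℕ) : Int) := by push_cast; ring
      rw [hstep]
      have hitems : (d.insert ((q : Int) ^ p) (p : Int)).items = d.items ++ [((q : Int) ^ p, (p : Int))] :=
        PySem.Dict.items_insert_of_not_contains _ _ hcontains
      rw [ih (p + 1) _ (by omega) (by rw [show p + 1 + f = p + (f + 1) by omega]; exact hbound) ?_]
      · rw [hitems, List.append_assoc]; rfl
      · intro e he hle2
        rw [PySem.Dict.contains_insert]
        have hne : ((q ^ e : ℕ) : Int) ≠ (q : Int) ^ p := by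
          rw [pvCastPow]
          intro hcontra
          have : q ^ e = q ^ p := by exact_mod_cast hcontra
          have : q ^ p < q ^ e := Nat.pow_lt_pow_right (by omega) (by omega)
          omega
        rw [beq_eq_false_iff_ne.mpr hne, hfresh e (by omega) hle2]
        rfl
    · rw [if_neg hle, if_neg hle, List.append_nil, pvMkItems]

-- A's inner loop over keys already present (with values ≥ exponent) is a no-op
theorem pvLoopA_noop {ub : Int} {q : ℕ} :
    ∀ (f p : ℕ) (d : PySem.Dict Int Int), d.keys.Nodup →
    (∀ e : ℕ, p ≤ e → ((q ^ e : ℕ) : Int) ≤ ub → ∃ v, d.get? ((q ^ e : ℕ) : Int) = some v ∧ (e : Int) ≤ v) →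
    gppLoopA ub (q : Int) f (p : Int) d = d := by
  intro f
  induction f with
  | zero => intro p d _ _; rw [gppLoopA]
  | succ f ih =>
    intro p d hnd hvals
    rw [gppLoopA]
    simp only [Int.toNat_natCast]
    by_cases hle : (q : Int) ^ p ≤ ub
    · rw [if_pos hle]
      have hle' : ((q ^ p : ℕ) : Int) ≤ ub := by rw [← pvCastPow]; exact hle
      obtain ⟨v, hget, hvge⟩ := hvals p (le_refl p) hle'
      have hget' : d.get? ((q : Int) ^ p) = some v := by rw [pvCastPow]; exact hget
      have hgetD : d.getD ((q : Int) ^ p) (-1) = v := by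
        rw [PySem.Dict.getD_eq_get?_getD, hget']; rfl
      rw [hgetD]
      have hmax : max (p : Int) v = v := max_eq_right hvge
      rw [hmax]
      have hins : d.insert ((q : Int) ^ p) v = d := pvInsert_self hnd hget'
      rw [hins]
      have hstep : (p : Int) + 1 = ((p + 1 : ℕ) : Int) := by push_cast; ring
      rw [hstep]
      exact ih (p + 1) d hnd (fun e he hle2 => hvals e (by omega) hle2)
    · rw [if_neg hle]

-- B's inner loop over fresh keys: same block, skip gains exactly the block's keys
theorem pvLoopB_eq {ub : Int} {q : ℕ} (hq : 2 ≤ q) :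
    ∀ (f p : ℕ) (d : PySem.Dict Int Int) (skip : PySem.Set Int), 1 ≤ p →
    ub < ((q ^ (p + f) : ℕ) : Int) →
    (∀ e : ℕ, p ≤ e → ((q ^ e : ℕ) : Int) ≤ ub → d.contains ((q ^ e : ℕ) : Int) = false) →
    ∃ sk' : PySem.Set Int,
      gppLoopB ub (q : Int) f (p : Int) ((q ^ p : ℕ) : Int) d skip
        = (PySem.Dict.mk (d.items ++ pvBlk ub (q : Int) f p), sk') ∧
      (∀ x : Int, x ∈ sk' ↔ x ∈ skip ∨
        ∃ e : ℕ, p ≤ e ∧ ((q ^ e : ℕ) : Int) ≤ ub ∧ x = ((q ^ e : ℕ) : Int)) := by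
  intro f
  induction f with
  | zero =>
    intro p d skip hp hbound hfresh
    refine ⟨skip, ?_, ?_⟩
    · rw [gppLoopB, pvBlk, List.append_nil, pvMkItems]
    · intro x
      constructor
      · intro hx; exact Or.inl hx
      · rintro (hx | ⟨e, he, hle, _⟩)
        · exact hx
        · exfalso
          have h1 : q ^ (p + 0) ≤ q ^ e := Nat.pow_le_pow_right (by omega) (by omega)
          have h2 : ((q ^ (p + 0) : ℕ) : Int) ≤ ((q ^ e : ℕ) : Int) := by exact_mod_cast h1
          omega
  | succ f ih =>
    intro p d skip hp hbound hfresh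
    by_cases hle : ((q ^ p : ℕ) : Int) ≤ ub
    · have hleq : (q : Int) ^ p ≤ ub := by rw [pvCastPow]; exact hle
      have hcontains : d.contains ((q ^ p : ℕ) : Int) = false := hfresh p (le_refl p) hle
      have hitems : (d.insert ((q ^ p : ℕ) : Int) (p : Int)).items
          = d.items ++ [(((q ^ p : ℕ) : Int), (p : Int))] :=
        PySem.Dict.items_insert_of_not_contains _ _ hcontains
      have hfresh' : ∀ e : ℕ, p + 1 ≤ e → ((q ^ e : ℕ) : Int) ≤ ub →
          (d.insert ((q ^ p : ℕ) : Int) (p : Int)).contains ((q ^ e : ℕ) : Int) = false := by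
        intro e he hle2
        rw [PySem.Dict.contains_insert]
        have hne : ((q ^ e : ℕ) : Int) ≠ ((q ^ p : ℕ) : Int) := by
          intro hcontra
          have h1 : q ^ e = q ^ p := by exact_mod_cast hcontra
          have h2 : q ^ p < q ^ e := Nat.pow_lt_pow_right (by omega) (by omega)
          omega
        rw [beq_eq_false_iff_ne.mpr hne, hfresh e (by omega) hle2]
        rfl
      obtain ⟨sk', hrec, hmem⟩ := ih (p + 1) (d.insert ((q ^ p : ℕ) : Int) (p : Int))
        (PySem.Set.add skip ((q ^ p : ℕ) : Int)) (by omega)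
        (by rw [show p + 1 + f = p + (f + 1) by omega]; exact hbound) hfresh'
      refine ⟨sk', ?_, ?_⟩
      · rw [gppLoopB]
        rw [if_pos hle]
        have hpw : ((q ^ p : ℕ) : Int) * (q : Int) = ((q ^ (p + 1) : ℕ) : Int) := by push_cast; ring
        have hstep : (p : Int) + 1 = ((p + 1 : ℕ) : Int) := by push_cast; ring
        rw [hpw, hstep, hrec, hitems, pvBlk]
        rw [if_pos hleq, pvCastPow, List.append_assoc]
        rfl
      · intro x
        rw [hmem x, PySem.Set.mem_add]
        constructor
        · rintro ((hx | hx) | ⟨e, he, h1, h2⟩)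
          · exact Or.inl hx
          · exact Or.inr ⟨p, le_refl p, hle, hx⟩
          · exact Or.inr ⟨e, by omega, h1, h2⟩
        · rintro (hx | ⟨e, he, h1, h2⟩)
          · exact Or.inl (Or.inl hx)
          · by_cases hep : e = p
            · subst hep; exact Or.inl (Or.inr h2)
            · exact Or.inr ⟨e, by omega, h1, h2⟩
    · refine ⟨skip, ?_, ?_⟩
      · rw [gppLoopB]
        rw [if_neg hle, pvBlk,
          if_neg (by rw [pvCastPow]; exact hle), List.append_nil, pvMkItems]
      · intro x
        constructor
        · intro hx; exact Or.inl hx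
        · rintro (hx | ⟨e, he, h1, h2⟩)
          · exact hx
          · exfalso
            have h3 : q ^ p ≤ q ^ e := Nat.pow_le_pow_right (by omega) (by omega)
            have h4 : ((q ^ p : ℕ) : Int) ≤ ((q ^ e : ℕ) : Int) := by exact_mod_cast h3
            omega

theorem pvSetContains {s : PySem.Set Int} {x : Int} :
    PySem.Set.contains s x = true ↔ x ∈ s := by
  simp [PySem.Set.contains]

theorem pvCanon_two (ub : Int) : pvCanon ub 2 = [] := by simp [pvCanon]

theorem pvCanon_succ {ub : Int} {b : ℕ} (hb : 2 ≤ b) :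
    pvCanon ub (b + 1) = pvCanon ub b ++
      (if pvPrim b then pvBlk ub (b : Int) (ub.toNat + 1) 2 else []) := by
  have h1 : List.range' 2 (b + 1 - 2) = List.range' 2 (b - 2) ++ [b] := by
    rw [show b + 1 - 2 = (b - 2) + 1 by omega, List.range'_concat,
      show 2 + 1 * (b - 2) = b by omega]
  unfold pvCanon
  rw [h1, List.flatMap_append]
  simp

theorem pvCanon_mem {ub : Int} (hub : 0 ≤ ub) {b : ℕ} (x v : Int) :
    (x, v) ∈ pvCanon ub b ↔
      ∃ q e : ℕ, 2 ≤ q ∧ q < b ∧ pvPrim q = true ∧ 2 ≤ e ∧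
        ((q ^ e : ℕ) : Int) ≤ ub ∧ x = ((q ^ e : ℕ) : Int) ∧ v = (e : Int) := by
  unfold pvCanon
  rw [List.mem_flatMap]
  constructor
  · rintro ⟨q, hqmem, hqin⟩
    rw [List.mem_range'_1] at hqmem
    by_cases hp : pvPrim q = true
    · rw [if_pos hp] at hqin
      have hq2 : 2 ≤ q := pvPrim_two_le hp
      obtain ⟨e, he, h1, h2, h3⟩ := pvBlk_mem_fwd hqin
      exact ⟨q, e, hq2, by omega, hp, by omega, h1, h2, h3⟩
    · rw [if_neg hp] at hqin; simp at hqin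
  · rintro ⟨q, e, hq2, hqb, hp, he2, hle, hx, hv⟩
    refine ⟨q, List.mem_range'_1.mpr ⟨by omega, by omega⟩, ?_⟩
    rw [if_pos hp]
    rw [pvBlk_mem hq2 (ub.toNat + 1) 2 x v (pvFuel_ok hub hq2 2)]
    exact ⟨e, he2, hle, hx, hv⟩

theorem pvCanon_keys_mem {ub : Int} (hub : 0 ≤ ub) {b : ℕ} (x : Int) :
    x ∈ (pvCanon ub b).map Prod.fst ↔
      ∃ q e : ℕ, 2 ≤ q ∧ q < b ∧ pvPrim q = true ∧ 2 ≤ e ∧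
        ((q ^ e : ℕ) : Int) ≤ ub ∧ x = ((q ^ e : ℕ) : Int) := by
  rw [List.mem_map]
  constructor
  · rintro ⟨⟨x', v⟩, hmem, hfst⟩
    obtain ⟨q, e, h1, h2, h3, h4, h5, h6, _⟩ := (pvCanon_mem hub x' v).mp hmem
    exact ⟨q, e, h1, h2, h3, h4, h5, by rw [← hfst]; exact h6⟩
  · rintro ⟨q, e, h1, h2, h3, h4, h5, h6⟩
    exact ⟨(x, (e : Int)), (pvCanon_mem hub x (e : Int)).mpr ⟨q, e, h1, h2, h3, h4, h5, h6, rfl⟩, rfl⟩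

-- a primitive base (or any of its powers) is not yet a key of pvCanon ub b when b is the base
theorem pvFresh_prim {ub : Int} (hub : 0 ≤ ub) {b : ℕ} (hb : pvPrim b = true) (e : ℕ) (he : 1 ≤ e) :
    ((b ^ e : ℕ) : Int) ∉ (pvCanon ub b).map Prod.fst := by
  intro hmem
  obtain ⟨q, e', hq2, hqb, hqp, he2, _, heq⟩ := (pvCanon_keys_mem hub _).mp hmem
  have : b ^ e = q ^ e' := by exact_mod_cast heq
  obtain ⟨h1, _⟩ := pvPrim_pow_inj hb hqp he (by omega) this
  omega

-- keys of pvCanon are distinct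
theorem pvBlk_keys_nodup {ub : Int} {q : ℕ} (hq : 2 ≤ q) :
    ∀ f p : ℕ, ((pvBlk ub (q : Int) f p).map Prod.fst).Nodup := by
  intro f
  induction f with
  | zero => intro p; simp [pvBlk]
  | succ f ih =>
    intro p
    rw [pvBlk]
    by_cases hle : (q : Int) ^ p ≤ ub
    · rw [if_pos hle]
      rw [List.map_cons, List.nodup_cons]
      refine ⟨?_, ih (p + 1)⟩
      intro hmem
      rw [List.mem_map] at hmem
      obtain ⟨⟨x', v⟩, hmem', hfst⟩ := hmem
      obtain ⟨e, he, _, hx, _⟩ := pvBlk_mem_fwd hmem'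
      have hfst' : x' = (q : Int) ^ p := hfst
      have h1 : (q : Int) ^ p = ((q ^ e : ℕ) : Int) := by rw [← hfst']; exact hx
      rw [pvCastPow] at h1
      have h2 : q ^ p = q ^ e := by exact_mod_cast h1
      have h3 : q ^ p < q ^ e := Nat.pow_lt_pow_right (by omega) (by omega)
      omega
    · rw [if_neg hle]; simp

theorem pvCanon_keys_nodup {ub : Int} (hub : 0 ≤ ub) : ∀ b : ℕ, ((pvCanon ub b).map Prod.fst).Nodup := by
  intro b
  induction b with
  | zero => simp [pvCanon]
  | succ b ih =>
    by_cases hb : 2 ≤ b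
    · rw [pvCanon_succ hb, List.map_append, List.nodup_append]
      refine ⟨ih, ?_, ?_⟩
      · by_cases hp : pvPrim b = true
        · rw [if_pos hp]; exact pvBlk_keys_nodup (pvPrim_two_le hp) _ 2
        · rw [if_neg hp]; simp
      · intro x hx1 y hy
        by_cases hp : pvPrim b = true
        · rw [if_pos hp, List.mem_map] at hy
          obtain ⟨⟨x', v⟩, hmem', hfst⟩ := hy
          obtain ⟨e, he, _, hxe, _⟩ := pvBlk_mem_fwd hmem'
          intro hxy
          have hyv : y = ((b ^ e : ℕ) : Int) := by rw [← hfst, hxe]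
          rw [hxy, hyv] at hx1
          exact pvFresh_prim hub hp e (by omega) hx1
        · rw [if_neg hp] at hy; simp at hy
    · have : b + 1 - 2 = 0 := by omega
      unfold pvCanon
      rw [this]
      simp

-- lookup in the canonical dict at a power of a composite base
theorem pvCanon_get? {ub : Int} (hub : 0 ≤ ub) {b s m : ℕ} (hs : pvPrim s = true)
    (hm : 2 ≤ m) (hsm : s ^ m = b) {j : ℕ} (hj : 2 ≤ j)
    (hle : ((b ^ j : ℕ) : Int) ≤ ub) :
    (PySem.Dict.mk (pvCanon ub b)).get? ((b ^ j : ℕ) : Int) = some ((m * j : ℕ) : Int) := by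
  have hs2 : 2 ≤ s := pvPrim_two_le hs
  have hsb : s < b := by
    rw [← hsm]
    calc s = s ^ 1 := (pow_one s).symm
      _ < s ^ m := Nat.pow_lt_pow_right (by omega) (by omega)
  have hpow : s ^ (m * j) = b ^ j := by rw [pow_mul, hsm]
  have hkeys : (PySem.Dict.mk (pvCanon ub b)).keys.Nodup := pvCanon_keys_nodup hub b
  rw [PySem.Dict.get?_eq_some_iff_mem_items _ _ _ hkeys]
  show (((b ^ j : ℕ) : Int), ((m * j : ℕ) : Int)) ∈ pvCanon ub b
  rw [pvCanon_mem hub]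
  refine ⟨s, m * j, hs2, hsb, hs, by nlinarith, ?_, ?_, rfl⟩
  · rw [hpow]; exact hle
  · rw [hpow]

-- Nat.sqrt bridge: the loop conditions of A and B agree
theorem pvSqrt_iff {ub : Int} (hub : 0 ≤ ub) (b : ℕ) :
    ((b : Int) * (b : Int) ≤ ub) ↔ b ≤ Nat.sqrt ub.toNat := by
  rw [Nat.le_sqrt]
  constructor
  · intro h
    have : ((b * b : ℕ) : Int) ≤ ((ub.toNat : ℕ) : Int) := by
      rw [Int.toNat_of_nonneg hub]; push_cast; exact h
    exact_mod_cast this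
  · intro h
    have : ((b * b : ℕ) : Int) ≤ ((ub.toNat : ℕ) : Int) := by exact_mod_cast h
    rw [Int.toNat_of_nonneg hub] at this
    push_cast at this
    exact this

theorem pvRange_empty {a b : Int} (h : b ≤ a) : PySem.List.pyRange a b 1 = [] := by
  rw [PySem.List.pyRange_one]
  rw [show (b - a).toNat = 0 by omega]
  rfl

-- the main simultaneous induction over bases
theorem pvMain {ub : Int} (hub : 0 ≤ ub) :
    ∀ (f b : ℕ), 2 ≤ b → Nat.sqrt ub.toNat < b + f →
    ∀ skip : PySem.Set Int, (∀ x : Int, x ∈ skip ↔ x ∈ (pvCanon ub b).map Prod.fst) →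
    (PySem.List.pyRange (b : Int) (((Nat.sqrt ub.toNat : ℕ) : Int) + 1) 1).foldl
        (fun d i => gppLoopA ub i (ub.toNat + 1) 2 d) (PySem.Dict.mk (pvCanon ub b))
      = gppOuterB ub f (b : Int) (PySem.Dict.mk (pvCanon ub b)) skip := by
  intro f
  induction f with
  | zero =>
    intro b hb hfuel skip hskip
    rw [gppOuterB, pvRange_empty (by exact_mod_cast (by omega : (Nat.sqrt ub.toNat + 1 : ℕ) ≤ b))]
    rfl
  | succ f ih =>
    intro b hb hfuel skip hskip
    by_cases hcond : (b : Int) * (b : Int) ≤ ub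
    · have hbR : b ≤ Nat.sqrt ub.toNat := (pvSqrt_iff hub b).mp hcond
      have hlt : (b : Int) < ((Nat.sqrt ub.toNat : ℕ) : Int) + 1 := by
        have : ((b : ℕ) : Int) ≤ ((Nat.sqrt ub.toNat : ℕ) : Int) := by exact_mod_cast hbR
        omega
      rw [PySem.List.pyRange_one_cons hlt, List.foldl_cons]
      rw [gppOuterB, if_pos hcond]
      by_cases hp : pvPrim b = true
      · -- primitive base: both sides append the block
        have hfresh : ∀ e : ℕ, 2 ≤ e → ((b ^ e : ℕ) : Int) ≤ ub →
            (PySem.Dict.mk (pvCanon ub b)).contains ((b ^ e : ℕ) : Int) = false := by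
          intro e he hle
          rw [PySem.Dict.contains_eq_decide_mem_keys]
          exact decide_eq_false (pvFresh_prim hub hp e (by omega))
        have hb2 : 2 ≤ b := pvPrim_two_le hp
        have hnotin : PySem.Set.contains skip (b : Int) = false := by
          rw [Bool.eq_false_iff]
          intro hmem'
          have hmem := pvSetContains.mp hmem'
          have := (hskip _).mp hmem
          have h1 : ((b ^ 1 : ℕ) : Int) ∈ (pvCanon ub b).map Prod.fst := by
            rw [pow_one]; exact this
          exact pvFresh_prim hub hp 1 (le_refl 1) h1
        rw [if_neg (by rw [hnotin]; simp)]
        have hA : gppLoopA ub (b : Int) (ub.toNat + 1) 2 (PySem.Dict.mk (pvCanon ub b))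
            = PySem.Dict.mk (pvCanon ub (b + 1)) := by
          have := pvLoopA_fresh hb2 (ub.toNat + 1) 2 (PySem.Dict.mk (pvCanon ub b)) (by omega)
            (pvFuel_ok hub hb2 2) (fun e he hle => hfresh e he hle)
          rw [show ((2 : ℕ) : Int) = (2 : Int) by rfl] at this
          exact this.trans (congrArg PySem.Dict.mk (by rw [pvCanon_succ hb, if_pos hp]))
        obtain ⟨sk', hB, hmem'⟩ := pvLoopB_eq hb2 (ub.toNat + 1) 2 (PySem.Dict.mk (pvCanon ub b))
          skip (by omega) (pvFuel_ok hub hb2 2) (fun e he hle => hfresh e he hle)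
        have hpw : (b : Int) * (b : Int) = ((b ^ 2 : ℕ) : Int) := by push_cast; ring
        rw [hpw]
        rw [show ((2 : ℕ) : Int) = (2 : Int) by rfl] at hB
        rw [hB]
        have hcanon1 : PySem.Dict.mk ((PySem.Dict.mk (pvCanon ub b)).items ++ pvBlk ub (b : Int) (ub.toNat + 1) 2)
            = PySem.Dict.mk (pvCanon ub (b + 1)) :=
          congrArg PySem.Dict.mk (by rw [pvCanon_succ hb, if_pos hp])
        have hskip' : ∀ x : Int, x ∈ sk' ↔ x ∈ (pvCanon ub (b + 1)).map Prod.fst := by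
          intro x
          rw [hmem' x, hskip x, pvCanon_keys_mem hub, pvCanon_keys_mem hub]
          constructor
          · rintro (⟨q, e, h1, h2, h3, h4, h5, h6⟩ | ⟨e, he, h1, h2⟩)
            · exact ⟨q, e, h1, by omega, h3, h4, h5, h6⟩
            · exact ⟨b, e, hb2, by omega, hp, he, h1, h2⟩
          · rintro ⟨q, e, h1, h2, h3, h4, h5, h6⟩
            by_cases hqb : q = b
            · subst hqb; exact Or.inr ⟨e, h4, h5, h6⟩
            · exact Or.inl ⟨q, e, h1, by omega, h3, h4, h5, h6⟩
        have hrec := ih (b + 1) (by omega) (by omega) sk' hskip'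
        rw [show (((b + 1 : ℕ)) : Int) = (b : Int) + 1 by push_cast; ring] at hrec
        rw [hA, hcanon1, ← hrec]
      · -- composite base: both sides leave the state unchanged
        obtain ⟨s, m, hs, hm1, hsm⟩ := pvExists_prim_root b hb
        have hm2 : 2 ≤ m := by
          by_contra hlt
          have hm1' : m = 1 := by omega
          rw [hm1', pow_one] at hsm
          subst hsm
          exact hp hs
        have hs2 : 2 ≤ s := pvPrim_two_le hs
        have hbub : (b : Int) ≤ ub := by nlinarith [hcond, (by exact_mod_cast hb : (2 : Int) ≤ (b : Int))]
        have hbin : (b : Int) ∈ (pvCanon ub b).map Prod.fst := by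
          rw [pvCanon_keys_mem hub]
          refine ⟨s, m, hs2, ?_, hs, hm2, ?_, ?_⟩
          · rw [← hsm]
            calc s = s ^ 1 := (pow_one s).symm
              _ < s ^ m := Nat.pow_lt_pow_right (by omega) (by omega)
          · rw [hsm]; exact hbub
          · rw [hsm]
        have hcontains : PySem.Set.contains skip (b : Int) = true :=
          pvSetContains.mpr ((hskip _).mpr hbin)
        rw [if_pos (by rw [hcontains])]
        have hA : gppLoopA ub (b : Int) (ub.toNat + 1) 2 (PySem.Dict.mk (pvCanon ub b))
            = PySem.Dict.mk (pvCanon ub b) := by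
          have := pvLoopA_noop (ub := ub) (q := b) (ub.toNat + 1) 2 (PySem.Dict.mk (pvCanon ub b))
            (pvCanon_keys_nodup hub b) ?_
          · rw [show ((2 : ℕ) : Int) = (2 : Int) by rfl] at this
            exact this
          · intro e he hle
            refine ⟨((m * e : ℕ) : Int), pvCanon_get? hub hs hm2 hsm he hle, ?_⟩
            have : e ≤ m * e := Nat.le_mul_of_pos_left e (by omega)
            exact_mod_cast this
        have hcanon1 : pvCanon ub (b + 1) = pvCanon ub b := by
          rw [pvCanon_succ hb, if_neg hp, List.append_nil]
        have hskip' : ∀ x : Int, x ∈ skip ↔ x ∈ (pvCanon ub (b + 1)).map Prod.fst := by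
          intro x; rw [hcanon1]; exact hskip x
        have hrec := ih (b + 1) (by omega) (by omega) skip hskip'
        rw [show (((b + 1 : ℕ)) : Int) = (b : Int) + 1 by push_cast; ring, hcanon1] at hrec
        rw [hA, ← hrec]
    · have hbR : Nat.sqrt ub.toNat < b := by
        by_contra h
        exact hcond ((pvSqrt_iff hub b).mpr (by omega))
      rw [gppOuterB, if_neg hcond,
        pvRange_empty (by exact_mod_cast (by omega : (Nat.sqrt ub.toNat + 1 : ℕ) ≤ b))]
      rfl

-- ===== VERDICT =====
theorem generate_perfect_powers_spec : Claim_equal_generate_perfect_powers := by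
  intro ub hdom hre
  unfold Pre_generate_perfect_powers at hre
  unfold Spec_generate_perfect_powers
  unfold generate_perfect_powers generate_perfect_powers_alt
  have h2 : ((2 : ℕ) : Int) = (2 : Int) := rfl
  have hinit : PySem.Dict.empty = PySem.Dict.mk (pvCanon ub 2) := by
    rw [pvCanon_two]; rfl
  have hskip0 : ∀ x : Int, x ∈ (PySem.Set.empty : PySem.Set Int) ↔ x ∈ (pvCanon ub 2).map Prod.fst := by
    intro x
    rw [pvCanon_two]
    constructor
    · intro h; simp [PySem.Set.empty] at h
    · intro h; simp at h
  have := pvMain hre (ub.toNat + 2) 2 (le_refl 2)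
    (by have := Nat.sqrt_le_self ub.toNat; omega) PySem.Set.empty hskip0
  rw [h2] at this
  rw [hinit, this]
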